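-- pv_equiv track=rewrite | github.com/zayzyyazy/pdf-reading-tracker | app/research_ai.py | _offline_summary
-- ===== SOURCE A (Python) =====
-- def _offline_summary(snippet: str) -> dict[str, str]:
--     title = "Untitled source"
--     lines = [ln.strip() for ln in snippet.splitlines() if ln.strip()]
--     if lines:
--         title = lines[0][:120]
--     points = _extract_signal_sentences(snippet, max_items=4)
--     if points:
--         summary = " ".join(points[:3])
--     else:
--         summary = (snippet[:500] + "…") if len(snippet) > 500 else snippet
--     return {"title": title, "summary": summary.strip() or "No text extracted."}
--
-- def _normalize_for_prompt(text: str) -> str: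
--     lines = []
--     for ln in (text or "").splitlines():
--         s = " ".join(ln.strip().split())
--         if len(s) < 2:
--             continue
--         lines.append(s)
--     return "\n".join(lines).strip()
--
-- def _extract_signal_sentences(text: str, max_items: int = 4) -> list[str]:
--     sents = []
--     raw = _normalize_for_prompt(text).replace("?", ".").replace("!", ".")
--     for part in raw.split("."):
--         s = part.strip()
--         if len(s) < 45:
--             continue
--         # Favor sentences with specific markers of claims/method/findings.
--         score = 0
--         low = s.lower()
--         for marker in ("argue", "claim", "find", "result", "because", "therefore", "however", "method", "evidence"):
--             if marker in low:
--                 score += 1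
--         sents.append((score, s))
--     sents.sort(key=lambda x: (-x[0], -len(x[1])))
--     out = []
--     for _, sent in sents:
--         out.append(sent[:220])
--         if len(out) >= max_items:
--             break
--     return out
-- ===== SOURCE B (Python) =====
-- _MARKERS = ("argue", "claim", "find", "result", "because", "therefore", "however", "method", "evidence")
--
--
-- def _clean_line(ln: str) -> str:
--     return " ".join(ln.strip().split())
--
--
-- def _normalize_for_prompt(text: str) -> str:
--     kept = [s for s in map(_clean_line, text.splitlines()) if len(s) >= 2]
--     return "\n".join(kept).strip()
--
--
-- def _score(s: str) -> int:
--     return sum(m in s.lower() for m in _MARKERS)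
--
--
-- def _extract_signal_sentences(text: str, max_items: int = 4) -> list[str]:
--     raw = _normalize_for_prompt(text).replace("?", ".").replace("!", ".")
--     sents = [(_score(s), s) for s in map(str.strip, raw.split(".")) if len(s) >= 45]
--     # A score counts distinct markers out of 9, so it always lies in 0..9: select the
--     # top sentences by distributing them into ten score buckets scanned from 9 down
--     # (a counting sort on the score), ordering each bucket by length only.
--     ordered = []
--     for sc in range(9, -1, -1):
--         bucket = [t for t in sents if t[0] == sc]
--         bucket.sort(key=lambda t: len(t[1]), reverse=True)
--         ordered += bucket
--     return [s[:220] for _, s in ordered[:max_items]]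
--
--
-- def _offline_summary(snippet: str) -> dict[str, str]:
--     title = next((ln.strip() for ln in snippet.splitlines() if ln.strip()), "Untitled source")[:120]
--     points = _extract_signal_sentences(snippet, max_items=4)
--     if points:
--         summary = " ".join(points[:3])
--     else:
--         summary = (snippet[:500] + "…") if len(snippet) > 500 else snippet
--     return {"title": title, "summary": summary.strip() or "No text extracted."}
-- ===== Notes on version B (the rewrite author's own statement) =====
-- stated objective: alternative
-- what changed: Replaces the global sort on the negated tuple key plus append/break loop with a counting-sort selection: since a sentence's score counts distinct markers out of 9 it always lies in 0..9, so B distributes the sentences into ten score buckets scanned from 9 down, sorts each bucket by length only, and slices the top max_items; normalize/title/score are also redone as comprehensions, next() first-match and a sum.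
import Mathlib
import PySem

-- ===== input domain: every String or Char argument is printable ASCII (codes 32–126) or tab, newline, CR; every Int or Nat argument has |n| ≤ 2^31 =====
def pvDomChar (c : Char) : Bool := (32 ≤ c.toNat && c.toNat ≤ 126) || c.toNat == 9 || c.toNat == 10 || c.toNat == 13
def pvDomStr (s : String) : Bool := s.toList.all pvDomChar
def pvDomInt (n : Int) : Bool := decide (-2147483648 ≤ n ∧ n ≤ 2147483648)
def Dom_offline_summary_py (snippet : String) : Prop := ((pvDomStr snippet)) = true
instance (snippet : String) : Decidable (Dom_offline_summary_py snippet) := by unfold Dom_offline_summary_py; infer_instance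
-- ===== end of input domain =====

-- B selects the top sentences by a counting-sort over the bounded score (0..9 marker hits):
-- ten score buckets scanned from 9 down, each ordered by length only, replacing A's global
-- sort on the negated tuple key plus append/break loop; same cost, objective: alternative.

-- the marker tuple (shared literal data of both programs)
def pvMarkers : List String :=
  ["argue", "claim", "find", "result", "because", "therefore", "however", "method", "evidence"]

-- s.split(".") with the literal non-empty separator "." (split? is none only for sep = "")
def pvSplitDot (s : String) : List String := (PySem.Str.split? s ".").getD []

-- ===== PORT A =====

-- _normalize_for_prompt: explicit loop, continue, accumulator list
def normA (text : String) : String :=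
  let t := if text = "" then "" else text   -- (text or "")
  let lines := (PySem.Str.splitlines t).foldl
    (fun lines ln =>
      let s := PySem.Str.join " " (PySem.Str.split₀ (PySem.Str.strip ln))
      if PySem.Str.len s < 2 then lines else lines ++ [s]) []
  PySem.Str.strip (PySem.Str.join "\n" lines)

-- the inner marker loop: score = 0; for marker in (...): if marker in low: score += 1
def scoreLoopA (low : String) : Int :=
  pvMarkers.foldl (fun score marker => if PySem.Str.isIn marker low then score + 1 else score) 0

-- the out-loop: append sent[:220], break once len(out) >= max_items
def outLoopA (sents : List (Int × String)) (out : List String) (maxItems : Int) : List String :=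
  match sents with
  | [] => out
  | (_, sent) :: rest =>
      let out := out ++ [PySem.Str.slice sent none (some 220)]
      if PySem.List.len out ≥ maxItems then out else outLoopA rest out maxItems

-- _extract_signal_sentences
def extractA (text : String) (maxItems : Int) : List String :=
  let raw := PySem.Str.replace (PySem.Str.replace (normA text) "?" ".") "!" "."
  let sents := (pvSplitDot raw).foldl
    (fun sents part =>
      let s := PySem.Str.strip part
      if PySem.Str.len s < 45 then sents
      else sents ++ [(scoreLoopA (PySem.Str.lower s), s)]) []
  let sents := PySem.List.sorted2 sents (fun x => -x.1) (fun x => -(PySem.Str.len x.2)) false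
  outLoopA sents [] maxItems

def offline_summary_py (snippet : String) : List (String × String) :=
  let title := "Untitled source"
  -- [ln.strip() for ln in snippet.splitlines() if ln.strip()]  (ln.strip() evaluated twice, as in Python)
  let lines := (PySem.Str.splitlines snippet).filterMap
    (fun ln => if PySem.Str.strip ln = "" then none else some (PySem.Str.strip ln))
  -- if lines: title = lines[0][:120]   (lines[0] guarded by the emptiness test)
  let title := if lines = [] then title
    else PySem.Str.slice (PySem.List.pyGetD lines 0 "") none (some 120)
  let points := extractA snippet 4
  let summary :=
    if points ≠ [] then PySem.Str.join " " (PySem.List.slice points none (some 3))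
    else if PySem.Str.len snippet > 500
      then PySem.Str.join "" [PySem.Str.slice snippet none (some 500), "…"]  -- '+' as join (exact)
      else snippet
  let s := PySem.Str.strip summary
  [("title", title), ("summary", if s = "" then "No text extracted." else s)]

-- ===== PORT B =====

-- _clean_line
def cleanLineB (ln : String) : String := PySem.Str.join " " (PySem.Str.split₀ (PySem.Str.strip ln))

-- _normalize_for_prompt: comprehension over map(_clean_line, …)
def normB (text : String) : String :=
  let kept := ((PySem.Str.splitlines text).map cleanLineB).filter (fun s => 2 ≤ PySem.Str.len s)
  PySem.Str.strip (PySem.Str.join "\n" kept)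

-- _score: sum(m in s.lower() for m in _MARKERS)
def scoreB (s : String) : Int :=
  (pvMarkers.countP (fun m => PySem.Str.isIn m (PySem.Str.lower s)) : Int)

-- _extract_signal_sentences: comprehension, then a counting-sort selection over the
-- ten possible scores: for sc in range(9, -1, -1): bucket = filter; bucket.sort(key=len, reverse=True); ordered += bucket
def extractB (text : String) (maxItems : Int) : List String :=
  let raw := PySem.Str.replace (PySem.Str.replace (normB text) "?" ".") "!" "."
  let sents := (((pvSplitDot raw).map PySem.Str.strip).filter
      (fun s => 45 ≤ PySem.Str.len s)).map (fun s => (scoreB s, s))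
  let ordered := (PySem.List.pyRange 9 (-1) (-1)).foldl
    (fun ordered sc =>
      let bucket := sents.filter (fun t => t.1 == sc)
      let bucket := PySem.List.sorted bucket (fun t => PySem.Str.len t.2) true
      ordered ++ bucket) []
  (PySem.List.slice ordered none (some maxItems)).map
    (fun t => PySem.Str.slice t.2 none (some 220))

def offline_summary_py_alt (snippet : String) : List (String × String) :=
  -- next((ln.strip() for ln in snippet.splitlines() if ln.strip()), "Untitled source")[:120]
  let title := PySem.Str.slice
    ((((PySem.Str.splitlines snippet).map PySem.Str.strip).find? (fun s => s ≠ "")).getD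
      "Untitled source") none (some 120)
  let points := extractB snippet 4
  let summary :=
    if points ≠ [] then PySem.Str.join " " (PySem.List.slice points none (some 3))
    else if PySem.Str.len snippet > 500
      then PySem.Str.join "" [PySem.Str.slice snippet none (some 500), "…"]  -- '+' as join (exact)
      else snippet
  let s := PySem.Str.strip summary
  [("title", title), ("summary", if s = "" then "No text extracted." else s)]

-- ===== PRECONDITION & SPEC =====
def Spec_offline_summary_py (snippet : String) (out : List (String × String)) : Prop := out = offline_summary_py_alt snippet
instance (snippet : String) (out : List (String × String)) : Decidable (Spec_offline_summary_py snippet out) := by unfold Spec_offline_summary_py; infer_instance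

-- ===== CLAIM (what is proved, stated in full; the proofs are below) =====
def Claim_equal_offline_summary_py : Prop := ∀ (snippet : String), Dom_offline_summary_py snippet → Spec_offline_summary_py snippet (offline_summary_py snippet)

-- ===== LEMMAS AND PROOFS =====

-- A's comparator on the negated (score, length) tuple key, and B's reverse length comparator
def pvLt (a b : Int × String) : Bool :=
  decide (-a.1 < -b.1) || (!decide (-b.1 < -a.1) && decide (-(PySem.Str.len a.2) < -(PySem.Str.len b.2)))

def pvLenBefore (a b : Int × String) : Bool := decide (PySem.Str.len b.2 < PySem.Str.len a.2)

theorem sorted2_unfold (xs : List (Int × String)) :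
    PySem.List.sorted2 xs (fun x => -x.1) (fun x => -(PySem.Str.len x.2)) false
      = xs.foldl (fun acc x => PySem.List.insertBy pvLt x acc) [] := rfl

theorem sortedRev_unfold (xs : List (Int × String)) :
    PySem.List.sorted xs (fun t => PySem.Str.len t.2) true
      = xs.foldl (fun acc x => PySem.List.insertBy pvLenBefore x acc) [] := rfl

theorem pvLt_of_eq {x y : Int × String} (h : x.1 = y.1) : pvLt x y = pvLenBefore x y := by
  simp [pvLt, pvLenBefore, h]

theorem pvLt_of_lt {x y : Int × String} (h : x.1 < y.1) : pvLt x y = false := by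
  simp [pvLt]
  omega

theorem pvLt_of_gt {x y : Int × String} (h : y.1 < x.1) : pvLt x y = true := by
  simp [pvLt]
  omega

theorem insertBy_append_left {α : Type} (before : α → α → Bool) (x : α) (l1 l2 : List α)
    (h : ∀ y ∈ l1, before x y = false) :
    PySem.List.insertBy before x (l1 ++ l2) = l1 ++ PySem.List.insertBy before x l2 := by
  induction l1 with
  | nil => simp
  | cons a t ih =>
      simp only [List.cons_append, PySem.List.insertBy]
      rw [h a (by simp), ih (fun y hy => h y (by simp [hy]))]
      simp

theorem insertBy_append_all {α : Type} (before q : α → α → Bool) (x : α) (b rest : List α)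
    (hb : ∀ y ∈ b, before x y = q x y) (hr : ∀ y ∈ rest, before x y = true) :
    PySem.List.insertBy before x (b ++ rest) = PySem.List.insertBy q x b ++ rest := by
  induction b with
  | nil =>
      simp only [List.nil_append]
      cases rest with
      | nil => rfl
      | cons r t =>
          have hrt := hr r (by simp)
          simp [PySem.List.insertBy, hrt]
  | cons a t ih =>
      simp only [List.cons_append, PySem.List.insertBy]
      rw [hb a (by simp)]
      by_cases hq : q x a = true
      · simp [hq]
      · simp only [Bool.not_eq_true] at hq
        simp [hq, ih (fun y hy => hb y (by simp [hy]))]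

-- inserting one element into the bucket concatenation = inserting it into its own bucket
theorem insertBy_flatMap (ks : List Int) (hks : ks.Pairwise (· > ·)) (x : Int × String)
    (hx : x.1 ∈ ks) (f : Int → List (Int × String)) (hf : ∀ k, ∀ y ∈ f k, y.1 = k) :
    PySem.List.insertBy pvLt x (ks.flatMap f)
      = ks.flatMap (fun k => if k = x.1 then PySem.List.insertBy pvLenBefore x (f k) else f k) := by
  induction ks with
  | nil => simp at hx
  | cons k ks' ih =>
      rw [List.pairwise_cons] at hks
      simp only [List.flatMap_cons]
      by_cases hk : k = x.1
      · rw [insertBy_append_all pvLt pvLenBefore x (f k) (ks'.flatMap f)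
          (fun y hy => pvLt_of_eq (by rw [hf k y hy, hk]))
          (by
            intro y hy
            rw [List.mem_flatMap] at hy
            obtain ⟨k', hk', hy'⟩ := hy
            exact pvLt_of_gt (by rw [hf k' y hy']; have := hks.1 k' hk'; omega))]
        rw [if_pos hk]
        congr 1
        have hnot : ∀ l : List Int, (∀ k' ∈ l, k' ≠ x.1) →
            (l.flatMap fun k => if k = x.1 then PySem.List.insertBy pvLenBefore x (f k) else f k)
              = l.flatMap f := by
          intro l hl
          induction l with
          | nil => simp
          | cons a t iht =>
              simp only [List.flatMap_cons]
              rw [if_neg (hl a (by simp)), iht (fun y hy => hl y (by simp [hy]))]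
        exact (hnot ks' (fun k' hk' => by have := hks.1 k' hk'; omega)).symm
      · have hx' : x.1 ∈ ks' := by cases hx with
          | head => exact absurd rfl hk
          | tail _ h => exact h
        have hkgt : x.1 < k := hks.1 x.1 hx'
        rw [insertBy_append_left pvLt x (f k) (ks'.flatMap f)
          (fun y hy => pvLt_of_lt (by rw [hf k y hy]; omega))]
        rw [if_neg hk, ih hks.2 hx']

def pvScores : List Int := [9, 8, 7, 6, 5, 4, 3, 2, 1, 0]

-- one insertion step of B's per-bucket reverse length sort
theorem sortedRev_snoc (g : List (Int × String)) (x : Int × String) :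
    PySem.List.sorted (g ++ [x]) (fun t => PySem.Str.len t.2) true
      = PySem.List.insertBy pvLenBefore x
          (PySem.List.sorted g (fun t => PySem.Str.len t.2) true) := by
  rw [sortedRev_unfold, List.foldl_append, List.foldl_cons, List.foldl_nil, ← sortedRev_unfold]

-- A's stable sort on the tuple key = B's score buckets, from 9 down, each sorted by length
theorem sorted2_eq_buckets (xs : List (Int × String)) (h : ∀ t ∈ xs, 0 ≤ t.1 ∧ t.1 ≤ 9) :
    PySem.List.sorted2 xs (fun x => -x.1) (fun x => -(PySem.Str.len x.2)) false
      = pvScores.flatMap (fun k =>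
          PySem.List.sorted (xs.filter (fun t => t.1 == k)) (fun t => PySem.Str.len t.2) true) := by
  induction xs using List.reverseRecOn with
  | nil => rw [sorted2_unfold]; simp [pvScores, PySem.List.sorted]
  | append_singleton xs x ih =>
      rw [sorted2_unfold, List.foldl_append, List.foldl_cons, List.foldl_nil, ← sorted2_unfold]
      rw [ih (fun t ht => h t (by simp [ht]))]
      have hx := h x (by simp)
      rw [insertBy_flatMap pvScores (by decide) x
        (by simp only [pvScores, List.mem_cons]; omega)
        (fun k => PySem.List.sorted (xs.filter (fun t => t.1 == k)) (fun t => PySem.Str.len t.2) true)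
        (fun k y hy => by
          rw [PySem.List.mem_sorted] at hy
          have := List.of_mem_filter hy
          simpa using this)]
      congr 1
      funext k
      rw [List.filter_append]
      by_cases hk : k = x.1
      · rw [if_pos hk]
        have : List.filter (fun t => t.1 == k) [x] = [x] := by simp [hk]
        rw [this, sortedRev_snoc]
      · rw [if_neg hk]
        have : List.filter (fun t => t.1 == k) [x] = [] := by
          simp only [List.filter_cons, List.filter_nil]
          rw [if_neg (by simp; omega)]
        rw [this, List.append_nil]

theorem scoreLoopA_eq_scoreB (s : String) : scoreLoopA (PySem.Str.lower s) = scoreB s := by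
  unfold scoreLoopA scoreB
  rw [PySem.List.foldl_count_if]
  simp

-- A's normalize loop (continue + append) is B's filter-of-map comprehension
theorem normLoop_eq (xs : List String) (acc : List String) :
    xs.foldl (fun lines ln =>
        if PySem.Str.len (PySem.Str.join " " (PySem.Str.split₀ (PySem.Str.strip ln))) < 2
        then lines
        else lines ++ [PySem.Str.join " " (PySem.Str.split₀ (PySem.Str.strip ln))]) acc
      = acc ++ (xs.map cleanLineB).filter (fun s => 2 ≤ PySem.Str.len s) := by
  induction xs generalizing acc with
  | nil => simp
  | cons x t ih =>
      simp only [List.foldl_cons, List.map_cons, List.filter_cons, cleanLineB]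
      by_cases h : PySem.Str.len (PySem.Str.join " " (PySem.Str.split₀ (PySem.Str.strip x))) < 2
      · rw [if_pos h, ih, if_neg (by simp only [decide_eq_true_eq]; omega)]
      · rw [if_neg h, ih, if_pos (by simp only [decide_eq_true_eq]; omega)]
        simp

theorem normA_eq_normB (text : String) : normA text = normB text := by
  unfold normA normB
  simp only []
  rw [show (if text = "" then "" else text) = text from by split <;> simp_all]
  rw [normLoop_eq _ []]
  rw [List.nil_append]

-- A's sentence loop (continue + append of (score, s)) is B's filter/map comprehension
theorem sentsLoop_eq (xs : List String) (acc : List (Int × String)) :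
    xs.foldl (fun sents part =>
        if PySem.Str.len (PySem.Str.strip part) < 45 then sents
        else sents ++ [(scoreLoopA (PySem.Str.lower (PySem.Str.strip part)), PySem.Str.strip part)]) acc
      = acc ++ ((xs.map PySem.Str.strip).filter (fun s => 45 ≤ PySem.Str.len s)).map
          (fun s => (scoreB s, s)) := by
  induction xs generalizing acc with
  | nil => simp
  | cons x t ih =>
      simp only [List.foldl_cons, List.map_cons, List.filter_cons]
      by_cases h : PySem.Str.len (PySem.Str.strip x) < 45
      · rw [if_pos h, ih, if_neg (by simp only [decide_eq_true_eq]; omega)]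
      · rw [if_neg h, ih, if_pos (by simp only [decide_eq_true_eq]; omega)]
        rw [scoreLoopA_eq_scoreB]
        simp

-- A's append/break loop is take (= the slice [:n]) composed with the truncation map
theorem outLoopA_eq_take_map (sents : List (Int × String)) (out : List String) (n : Nat)
    (h : out.length < n) :
    outLoopA sents out (n : Int)
      = out ++ ((sents.take (n - out.length)).map
          (fun t => PySem.Str.slice t.2 none (some 220))) := by
  induction sents generalizing out with
  | nil => simp [outLoopA]
  | cons x t ih =>
      unfold outLoopA
      by_cases hn : (PySem.List.len (out ++ [PySem.Str.slice x.2 none (some 220)]) ≥ (n : Int))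
      · rw [if_pos hn]
        simp only [PySem.List.len_eq, List.length_append, List.length_singleton] at hn
        have hlen : n - out.length = 1 := by omega
        simp [hlen]
      · rw [if_neg hn]
        simp only [PySem.List.len_eq, List.length_append, List.length_singleton] at hn
        rw [ih (out ++ [PySem.Str.slice x.2 none (some 220)]) (by simp; omega)]
        have hlen : n - out.length = (n - (out.length + 1)) + 1 := by omega
        simp only [List.length_append, List.length_singleton, hlen, List.take_succ_cons,
          List.map_cons, List.append_assoc, List.singleton_append]

-- B's bucket loop (ordered += bucket) is the flatMap over the descending score range
theorem bucketLoop_eq (sents : List (Int × String)) :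
    (PySem.List.pyRange 9 (-1) (-1)).foldl
        (fun ordered sc => ordered ++
          PySem.List.sorted (sents.filter (fun t => t.1 == sc)) (fun t => PySem.Str.len t.2) true) []
      = pvScores.flatMap (fun k =>
          PySem.List.sorted (sents.filter (fun t => t.1 == k)) (fun t => PySem.Str.len t.2) true) := by
  rw [show PySem.List.pyRange 9 (-1) (-1) = pvScores from rfl]
  simp [pvScores]

theorem extractA_eq_extractB (text : String) : extractA text 4 = extractB text 4 := by
  unfold extractA extractB
  simp only []
  rw [normA_eq_normB]
  rw [sentsLoop_eq _ [], List.nil_append]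
  rw [sorted2_eq_buckets _ (by
    intro t ht
    simp only [List.mem_map] at ht
    obtain ⟨s, _, rfl⟩ := ht
    simp only [scoreB]
    have hle : pvMarkers.countP (fun m => PySem.Str.isIn m (PySem.Str.lower s)) ≤ 9 := by
      have := List.countP_le_length
        (l := pvMarkers) (p := fun m => PySem.Str.isIn m (PySem.Str.lower s))
      simpa [pvMarkers] using this
    omega)]
  rw [bucketLoop_eq]
  rw [show ((4 : Int)) = (((4 : Nat) : Int)) from rfl]
  rw [outLoopA_eq_take_map _ [] 4 (by simp)]
  rw [PySem.List.slice_to_natCast]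
  simp

-- A's full-list title computation is B's first-match form
theorem title_eq (snippet : String) :
    (if ((PySem.Str.splitlines snippet).filterMap
          (fun ln => if PySem.Str.strip ln = "" then none else some (PySem.Str.strip ln))) = []
      then "Untitled source"
      else PySem.Str.slice
        (PySem.List.pyGetD ((PySem.Str.splitlines snippet).filterMap
          (fun ln => if PySem.Str.strip ln = "" then none else some (PySem.Str.strip ln))) 0 "")
        none (some 120))
    = PySem.Str.slice
        ((((PySem.Str.splitlines snippet).map PySem.Str.strip).find? (fun s => s ≠ "")).getD
          "Untitled source") none (some 120) := by
  have hfm : ∀ xs : List String, xs.filterMap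
      (fun ln => if PySem.Str.strip ln = "" then none else some (PySem.Str.strip ln))
      = (xs.map PySem.Str.strip).filter (fun s => s ≠ "") := by
    intro xs
    induction xs with
    | nil => rfl
    | cons x t ih =>
        simp only [List.filterMap_cons, List.map_cons, List.filter_cons]
        by_cases hx : PySem.Str.strip x = "" <;> simp [hx, ih]
  rw [hfm]
  rw [← List.head?_filter]
  cases hl : ((PySem.Str.splitlines snippet).map PySem.Str.strip).filter (fun s => s ≠ "") with
  | nil => simp; decide
  | cons l0 t =>
      rw [if_neg (by simp)]
      simp [PySem.List.pyGetD_zero]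

-- ===== VERDICT (by name: the statement is the Claim_ definition above) =====
theorem offline_summary_py_spec : Claim_equal_offline_summary_py := by
  intro snippet _
  show offline_summary_py snippet = offline_summary_py_alt snippet
  unfold offline_summary_py offline_summary_py_alt
  simp only []
  rw [extractA_eq_extractB, title_eq]
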